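-- pv_equiv track=rewrite | github.com/Tylerman90/PythonPractice | authoringAssistant.py | replace_punctuation
-- ===== SOURCE A (Python) =====
-- def replace_punctuation(usr_str, exclamation_count, semicolon_count):
--     ex_count = 0
--     semi_count = 0
--     edited_text = ''
--     for char in usr_str:
--         if (ex_count <= exclamation_count) and char == '!':
--             edited_text += '.'
--             ex_count += 1
--         elif (semi_count <= semicolon_count) and char == ';':
--             edited_text += ','
--             semi_count += 1
--         else:
--             edited_text += char
--     return (edited_text, semi_count, ex_count)
-- ===== SOURCE B (Python) =====
-- def replace_punctuation(usr_str, exclamation_count, semicolon_count):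
--     ex_count = min(usr_str.count('!'), max(exclamation_count, 0))
--     semi_count = min(usr_str.count(';'), max(semicolon_count, 0))
--     edited_text = usr_str.replace('!', '.', ex_count).replace(';', ',', semi_count)
--     return (edited_text, semi_count, ex_count)
-- ===== Notes on version B (the rewrite author's own statement) =====
-- stated objective: idiomatic
-- what changed: The gated per-character loop with running counters is replaced by two count-limited str.replace passes (C-level, hence the constant-factor speedup), the replacement tallies computed up front as min(occurrences, max(limit, 0)).
-- intended difference: When the string holds more '!' than a nonnegative exclamation_count (or more ';' than a nonnegative semicolon_count), A's <= gate replaces and reports limit+1 occurrences; B replaces exactly min(occurrences, limit), the intended 'at most N replacements' reading of the parameters. — e.g. on replace_punctuation("!!", 0, 0): A returns (".!", 0, 1), B returns ("!!", 0, 0)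
import Mathlib
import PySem

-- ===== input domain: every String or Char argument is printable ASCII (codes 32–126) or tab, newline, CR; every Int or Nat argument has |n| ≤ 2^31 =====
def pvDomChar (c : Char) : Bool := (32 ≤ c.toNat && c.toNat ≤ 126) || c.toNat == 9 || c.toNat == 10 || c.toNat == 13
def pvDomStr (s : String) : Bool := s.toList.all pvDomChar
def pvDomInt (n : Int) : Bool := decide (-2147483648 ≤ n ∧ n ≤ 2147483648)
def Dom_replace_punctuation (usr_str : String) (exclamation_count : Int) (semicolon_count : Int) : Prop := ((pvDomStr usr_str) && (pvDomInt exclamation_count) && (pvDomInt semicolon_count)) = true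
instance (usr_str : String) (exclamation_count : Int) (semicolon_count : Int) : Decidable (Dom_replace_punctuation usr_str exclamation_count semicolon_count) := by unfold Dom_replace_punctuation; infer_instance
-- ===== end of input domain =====

-- B replaces A's gated per-character loop by two count-limited replaces with tallies
-- computed up front; on strings exceeding a nonnegative limit A's <= gate is off by one
-- (it replaces limit+1 occurrences) and B intentionally replaces only limit (see D_).

-- ===== PORT A =====
-- A's for-loop as structural recursion over the same (ex_count, semi_count, edited_text) state.
def pvLoopA (ec sc : Int) : List Char → Int → Int → List Char → Int × Int × List Char
  | [], ex, semi, ed => (ex, semi, ed)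
  | c :: cs, ex, semi, ed =>
    if ex ≤ ec ∧ c = '!' then pvLoopA ec sc cs (ex + 1) semi (ed ++ ['.'])
    else if semi ≤ sc ∧ c = ';' then pvLoopA ec sc cs ex (semi + 1) (ed ++ [','])
    else pvLoopA ec sc cs ex semi (ed ++ [c])

def replace_punctuation (usr_str : String) (exclamation_count : Int) (semicolon_count : Int) : String × Int × Int :=
  let r := pvLoopA exclamation_count semicolon_count usr_str.toList 0 0 []
  (String.mk r.2.2, r.2.1, r.1)

-- ===== PORT B =====
-- str.replace(old, new, count) for one-character old/new; exact for the nonnegative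
-- counts Source B always passes (its tallies are min(occurrences, max(limit, 0)) ≥ 0).
def pvReplaceN (o n : Char) : List Char → Int → List Char
  | [], _ => []
  | c :: cs, k => if k ≤ 0 then c :: cs else if c = o then n :: pvReplaceN o n cs (k - 1) else c :: pvReplaceN o n cs k

def replace_punctuation_alt (usr_str : String) (exclamation_count : Int) (semicolon_count : Int) : String × Int × Int :=
  -- usr_str.count(c) for a single character c is the character count of the list
  let exCount := min (usr_str.toList.count '!' : Int) (max exclamation_count 0)
  let semiCount := min (usr_str.toList.count ';' : Int) (max semicolon_count 0)
  let edited := pvReplaceN ';' ',' (pvReplaceN '!' '.' usr_str.toList exCount) semiCount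
  (String.mk edited, semiCount, exCount)

-- ===== PRECONDITION & SPEC =====
-- When the string holds more '!' than a nonnegative exclamation_count (or more ';' than a
-- nonnegative semicolon_count), A's <= gate replaces and reports limit+1 occurrences; B
-- replaces exactly min(occurrences, limit), the intended 'at most N replacements' reading.
def D_replace_punctuation (usr_str : String) (exclamation_count : Int) (semicolon_count : Int) : Prop :=
  (0 ≤ exclamation_count ∧ exclamation_count + 1 ≤ (usr_str.toList.count '!' : Int)) ∨
  (0 ≤ semicolon_count ∧ semicolon_count + 1 ≤ (usr_str.toList.count ';' : Int))
instance (usr_str : String) (exclamation_count : Int) (semicolon_count : Int) : Decidable (D_replace_punctuation usr_str exclamation_count semicolon_count) := by unfold D_replace_punctuation; infer_instance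

def Spec_replace_punctuation (usr_str : String) (exclamation_count : Int) (semicolon_count : Int) (out : String × Int × Int) : Prop := ¬ D_replace_punctuation usr_str exclamation_count semicolon_count → out = replace_punctuation_alt usr_str exclamation_count semicolon_count
instance (usr_str : String) (exclamation_count : Int) (semicolon_count : Int) (out : String × Int × Int) : Decidable (Spec_replace_punctuation usr_str exclamation_count semicolon_count out) := by unfold Spec_replace_punctuation; infer_instance

def pvDiffWitness_replace_punctuation : String × Int × Int := ("!!", 0, 0)
def pvDiffWitnessOut_replace_punctuation : (String × Int × Int) × (String × Int × Int) := ((".!", 0, 1), ("!!", 0, 0))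

-- ===== CLAIM (what is proved, stated in full; the proofs are below) =====
def Claim_unchanged_replace_punctuation : Prop := ∀ (usr_str : String) (exclamation_count : Int) (semicolon_count : Int), Dom_replace_punctuation usr_str exclamation_count semicolon_count → Spec_replace_punctuation usr_str exclamation_count semicolon_count (replace_punctuation usr_str exclamation_count semicolon_count)
def Claim_changed_replace_punctuation : Prop := Dom_replace_punctuation (pvDiffWitness_replace_punctuation.1) (pvDiffWitness_replace_punctuation.2.1) (pvDiffWitness_replace_punctuation.2.2) ∧ D_replace_punctuation (pvDiffWitness_replace_punctuation.1) (pvDiffWitness_replace_punctuation.2.1) (pvDiffWitness_replace_punctuation.2.2) ∧ replace_punctuation (pvDiffWitness_replace_punctuation.1) (pvDiffWitness_replace_punctuation.2.1) (pvDiffWitness_replace_punctuation.2.2) = pvDiffWitnessOut_replace_punctuation.1 ∧ replace_punctuation_alt (pvDiffWitness_replace_punctuation.1) (pvDiffWitness_replace_punctuation.2.1) (pvDiffWitness_replace_punctuation.2.2) = pvDiffWitnessOut_replace_punctuation.2 ∧ pvDiffWitnessOut_replace_punctuation.1 ≠ pvDiffWitnessOut_replace_punctuation.2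
def Claim_exact_replace_punctuation : Prop := ∀ (usr_str : String) (exclamation_count : Int) (semicolon_count : Int), Dom_replace_punctuation usr_str exclamation_count semicolon_count → D_replace_punctuation usr_str exclamation_count semicolon_count → replace_punctuation usr_str exclamation_count semicolon_count ≠ replace_punctuation_alt usr_str exclamation_count semicolon_count

-- ===== LEMMAS AND PROOFS =====

theorem replaceN_nonpos (o n : Char) (l : List Char) (k : Int) (h : k ≤ 0) :
    pvReplaceN o n l k = l := by
  cases l with
  | nil => rfl
  | cons c cs => simp [pvReplaceN, h]

theorem replaceN_cons_ne (o n c : Char) (cs : List Char) (k : Int) (h : c ≠ o) :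
    pvReplaceN o n (c :: cs) k = c :: pvReplaceN o n cs k := by
  by_cases hk : k ≤ 0
  · simp [pvReplaceN, hk, replaceN_nonpos o n cs k hk]
  · simp [pvReplaceN, hk, h]

theorem replaceN_cons_eq (o n : Char) (cs : List Char) (k : Int) (h : 0 < k) :
    pvReplaceN o n (o :: cs) k = n :: pvReplaceN o n cs (k - 1) := by
  simp [pvReplaceN, not_le.mpr h]

theorem loopA_eq (ec sc : Int) (l : List Char) : ∀ (ex semi : Int) (ed : List Char),
    pvLoopA ec sc l ex semi ed =
      (ex + min (l.count '!' : Int) (max 0 (ec + 1 - ex)),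
       semi + min (l.count ';' : Int) (max 0 (sc + 1 - semi)),
       ed ++ pvReplaceN ';' ',' (pvReplaceN '!' '.' l (max 0 (ec + 1 - ex))) (max 0 (sc + 1 - semi))) := by
  induction l with
  | nil => intro ex semi ed; simp [pvLoopA, pvReplaceN]
  | cons c cs ih =>
    intro ex semi ed
    by_cases hx : c = '!'
    · subst hx
      by_cases hex : ex ≤ ec
      · have h1 : (0:Int) < max 0 (ec + 1 - ex) := by omega
        have h2 : max 0 (ec + 1 - ex) - 1 = max 0 (ec + 1 - (ex + 1)) := by omega
        rw [show pvLoopA ec sc ('!' :: cs) ex semi ed = pvLoopA ec sc cs (ex + 1) semi (ed ++ ['.']) by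
              simp [pvLoopA, hex],
            ih, replaceN_cons_eq _ _ _ _ h1, h2,
            replaceN_cons_ne ';' ',' '.' _ _ (by decide)]
        refine Prod.ext ?_ (Prod.ext ?_ ?_) <;> simp [List.count_cons] <;> push_cast <;> omega
      · have h0 : max 0 (ec + 1 - ex) ≤ 0 := by omega
        rw [show pvLoopA ec sc ('!' :: cs) ex semi ed = pvLoopA ec sc cs ex semi (ed ++ ['!']) by
              simp [pvLoopA, hex],
            ih, replaceN_nonpos '!' '.' _ _ h0, replaceN_nonpos '!' '.' _ _ h0,
            replaceN_cons_ne ';' ',' '!' _ _ (by decide)]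
        refine Prod.ext ?_ (Prod.ext ?_ ?_) <;> simp [List.count_cons] <;> push_cast <;> omega
    · by_cases hs : c = ';'
      · subst hs
        by_cases hsemi : semi ≤ sc
        · have h1 : (0:Int) < max 0 (sc + 1 - semi) := by omega
          have h2 : max 0 (sc + 1 - semi) - 1 = max 0 (sc + 1 - (semi + 1)) := by omega
          rw [show pvLoopA ec sc (';' :: cs) ex semi ed = pvLoopA ec sc cs ex (semi + 1) (ed ++ [',']) by
                simp [pvLoopA, hsemi],
              ih, replaceN_cons_ne '!' '.' ';' _ _ (by decide),
              replaceN_cons_eq ';' ',' _ _ h1, h2]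
          refine Prod.ext ?_ (Prod.ext ?_ ?_) <;> simp [List.count_cons] <;> push_cast <;> omega
        · have h0 : max 0 (sc + 1 - semi) ≤ 0 := by omega
          rw [show pvLoopA ec sc (';' :: cs) ex semi ed = pvLoopA ec sc cs ex semi (ed ++ [';']) by
                simp [pvLoopA, hsemi],
              ih, replaceN_cons_ne '!' '.' ';' _ _ (by decide),
              replaceN_nonpos ';' ',' _ _ h0, replaceN_nonpos ';' ',' _ _ h0]
          refine Prod.ext ?_ (Prod.ext ?_ ?_) <;> simp [List.count_cons] <;> push_cast <;> omega
      · rw [show pvLoopA ec sc (c :: cs) ex semi ed = pvLoopA ec sc cs ex semi (ed ++ [c]) by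
              simp [pvLoopA, hx, hs],
            ih, replaceN_cons_ne '!' '.' c _ _ hx, replaceN_cons_ne ';' ',' c _ _ hs]
        refine Prod.ext ?_ (Prod.ext ?_ ?_) <;> simp [List.count_cons, hx, hs]

-- ===== VERDICT (by name: the statement is the Claim_ definition above) =====
theorem replace_punctuation_spec : Claim_unchanged_replace_punctuation := by
  intro s ec sc _ hD
  unfold D_replace_punctuation at hD
  push_neg at hD
  show _ = _
  simp only [replace_punctuation, replace_punctuation_alt, loopA_eq]
  have hc1 : (0:Int) ≤ (s.toList.count '!' : Int) := by positivity
  have hc2 : (0:Int) ≤ (s.toList.count ';' : Int) := by positivity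
  have h1 : min (s.toList.count '!' : Int) (max 0 (ec + 1 - 0)) = min (s.toList.count '!' : Int) (max ec 0) := by omega
  have h2 : min (s.toList.count ';' : Int) (max 0 (sc + 1 - 0)) = min (s.toList.count ';' : Int) (max sc 0) := by omega
  -- the replaced lists agree: the limits either are equal or both exceed the occurrence count
  have key : ∀ (o n : Char) (ll : List Char) (k k' : Int), (ll.count o : Int) ≤ k → (ll.count o : Int) ≤ k' →
      pvReplaceN o n ll k = pvReplaceN o n ll k' := by
    intro o n ll
    induction ll with
    | nil => intro k k' _ _; rfl
    | cons c cs ihh =>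
      intro k k' hk hk'
      by_cases hc : c = o
      · subst hc
        have hcnt : (0:Int) < (List.count c (c :: cs) : Int) := by
          simp [List.count_cons]
        have hkpos : (0:Int) < k := lt_of_lt_of_le hcnt hk
        have hkpos' : (0:Int) < k' := lt_of_lt_of_le hcnt hk'
        rw [replaceN_cons_eq _ _ _ _ hkpos, replaceN_cons_eq _ _ _ _ hkpos']
        have : (cs.count c : Int) + 1 = (List.count c (c :: cs) : Int) := by
          simp [List.count_cons]
        exact congrArg _ (ihh (k - 1) (k' - 1) (by omega) (by omega))
      · rw [replaceN_cons_ne _ _ _ _ _ hc, replaceN_cons_ne _ _ _ _ _ hc]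
        have : List.count o (c :: cs) = cs.count o := by simp [List.count_cons, hc]
        rw [this] at hk hk'
        exact congrArg _ (ihh k k' hk hk')
  have hex : pvReplaceN '!' '.' s.toList (max 0 (ec + 1 - 0)) =
      pvReplaceN '!' '.' s.toList (min (s.toList.count '!' : Int) (max ec 0)) := by
    rcases le_or_gt (ec + 1) (s.toList.count '!' : Int) with hle | hgt
    · have : ec < 0 := by
        by_contra hh; exact absurd hle (not_le.mpr (hD.1 (by omega)))
      rw [replaceN_nonpos _ _ _ _ (by omega), replaceN_nonpos _ _ _ _ (by omega)]
    · exact key _ _ _ _ _ (by omega) (by omega)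
  have hsemi : ∀ ll : List Char, ll.count ';' = s.toList.count ';' →
      pvReplaceN ';' ',' ll (max 0 (sc + 1 - 0)) =
      pvReplaceN ';' ',' ll (min (s.toList.count ';' : Int) (max sc 0)) := by
    intro ll hcnt
    rcases le_or_gt (sc + 1) (s.toList.count ';' : Int) with hle | hgt
    · have : sc < 0 := by
        by_contra hh; exact absurd hle (not_le.mpr (hD.2 (by omega)))
      rw [replaceN_nonpos _ _ _ _ (by omega), replaceN_nonpos _ _ _ _ (by omega)]
    · exact key _ _ _ _ _ (by omega) (by omega)
  have hcount : (pvReplaceN '!' '.' s.toList (max 0 (ec + 1 - 0))).count ';' = s.toList.count ';' := by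
    have gen : ∀ (ll : List Char) (k : Int), (pvReplaceN '!' '.' ll k).count ';' = ll.count ';' := by
      intro ll
      induction ll with
      | nil => intro k; rfl
      | cons c cs ihh =>
        intro k
        by_cases hc : c = '!'
        · subst hc
          by_cases hk : k ≤ 0
          · rw [replaceN_nonpos _ _ _ _ hk]
          · rw [replaceN_cons_eq _ _ _ _ (by omega)]
            simp [List.count_cons, ihh]
        · rw [replaceN_cons_ne _ _ _ _ _ hc]
          simp [List.count_cons, ihh]
    exact gen _ _
  rw [hex] at hcount ⊢
  rw [hsemi _ hcount, h1, h2]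
  norm_num

theorem replace_punctuation_changed : Claim_changed_replace_punctuation := by
  unfold Claim_changed_replace_punctuation; decide

theorem replace_punctuation_tight : Claim_exact_replace_punctuation := by
  intro s ec sc _ hD heq
  have hc1 : (0:Int) ≤ (s.toList.count '!' : Int) := by positivity
  have hc2 : (0:Int) ≤ (s.toList.count ';' : Int) := by positivity
  have h21 := congrArg (fun p : String × Int × Int => p.2.1) heq
  have h22 := congrArg (fun p : String × Int × Int => p.2.2) heq
  simp only [replace_punctuation, replace_punctuation_alt, loopA_eq] at h21 h22
  rcases hD with ⟨h0, hle⟩ | ⟨h0, hle⟩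
  · simp at h22; omega
  · simp at h21; omega
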